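-- pv_equiv track=rewrite | github.com/ParkHyoungChul/LLM_finetune | extract/preprocess.py | divide_sections
-- ===== SOURCE A (Python) =====
-- def divide_sections(values, sections):
--     divided_sections = []
--     end = len(values)
--     for start, idx in sections:
--         divided_sections.append((idx, values[start:end]))
--         end = start
--     divided_sections.append((None, values[:end]))  # 첫번째 섹션을 추가합니다.
--     return list(reversed(divided_sections))
-- ===== SOURCE B (Python) =====
-- def divide_sections(values, sections):
--     n = len(values)
--
--     def clamp(i):
--         return max(0, min(n, i + n if i < 0 else i))
--
--     # Stage 1: normalize every boundary to a clamped absolute index, in output order.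
--     cuts = [clamp(s) for s, _ in sections][::-1]
--     labels = [i for _, i in sections][::-1]
--     # Stage 2: pair each boundary with the next one (the last section ends at n).
--     ends = cuts[1:] + [n]
--     # Stage 3: materialize all segments in one comprehension; no loop-carried state.
--     head = (None, values[:cuts[0]] if cuts else list(values))
--     return [head] + [(i, values[a:b]) for i, a, b in zip(labels, cuts, ends)]
-- ===== Notes on version B (the rewrite author's own statement) =====
-- stated objective: alternative
-- what changed: B first normalizes every section boundary to a clamped absolute index (making Python's implicit slice clamping explicit), then pairs adjacent boundaries by zipping the boundary list with its shifted self and emits all segments in output order in a single comprehension, with no loop-carried end state and no reversal of the result.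
import Mathlib
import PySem

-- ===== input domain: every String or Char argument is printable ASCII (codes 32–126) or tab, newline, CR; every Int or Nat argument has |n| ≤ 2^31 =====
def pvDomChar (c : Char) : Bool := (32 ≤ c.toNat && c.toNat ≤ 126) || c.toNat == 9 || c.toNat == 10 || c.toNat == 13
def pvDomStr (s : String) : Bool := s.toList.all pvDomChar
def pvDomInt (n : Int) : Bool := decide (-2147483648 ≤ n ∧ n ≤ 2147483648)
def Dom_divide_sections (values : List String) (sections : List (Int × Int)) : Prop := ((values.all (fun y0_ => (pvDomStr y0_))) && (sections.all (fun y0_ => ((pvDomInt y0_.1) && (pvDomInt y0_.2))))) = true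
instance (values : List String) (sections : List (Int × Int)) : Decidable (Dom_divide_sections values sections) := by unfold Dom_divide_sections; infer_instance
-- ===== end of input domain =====

-- B normalizes every boundary to a clamped absolute index, then pairs adjacent boundaries by
-- zipping the boundary list with its shifted self and emits all segments in output order in one
-- comprehension — no loop-carried state and no reversal of the result (objective: alternative).

-- ===== PORT A =====
-- literal port of A: fold over sections carrying (accumulated list, end), append the (None, …) head, reverse
def divide_sections (values : List String) (sections : List (Int × Int)) : List (Option Int × List String) :=
  let r := sections.foldl
    (fun (st : List (Option Int × List String) × Int) p =>
      (st.1 ++ [(some p.2, PySem.List.slice values (some p.1) (some st.2))], p.1))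
    ([], (values.length : Int))
  (r.1 ++ [(none, PySem.List.slice values none (some r.2))]).reverse

-- ===== PORT B =====
-- Source B's clamp(i) = max(0, min(n, i + n if i < 0 else i))
def clampB (n i : Int) : Int := max 0 (min n (if i < 0 then i + n else i))

def divide_sections_alt (values : List String) (sections : List (Int × Int)) : List (Option Int × List String) :=
  let n : Int := values.length
  let cuts := (sections.map (fun p => clampB n p.1)).reverse
  let labels := (sections.map (fun p => p.2)).reverse
  let ends := cuts.tail ++ [n]
  let head : Option Int × List String :=
    (none, match cuts with
           | [] => values
           | c :: _ => PySem.List.slice values none (some c))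
  head :: (labels.zip (cuts.zip ends)).map
    (fun q => (some q.1, PySem.List.slice values (some q.2.1) (some q.2.2)))

-- ===== PRECONDITION & SPEC =====
def Spec_divide_sections (values : List String) (sections : List (Int × Int)) (out : List (Option Int × List String)) : Prop := out = divide_sections_alt values sections
instance (values : List String) (sections : List (Int × Int)) (out : List (Option Int × List String)) : Decidable (Spec_divide_sections values sections out) := by unfold Spec_divide_sections; infer_instance

-- ===== CLAIM (what is proved, stated in full; the proofs are below) =====
def Claim_equal_divide_sections : Prop := ∀ (values : List String) (sections : List (Int × Int)), Dom_divide_sections values sections → Spec_divide_sections values sections (divide_sections values sections)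

-- ===== LEMMAS AND PROOFS =====

-- clamping a boundary does not change where the slice cuts
theorem clampIdx_clampB (n : Nat) (i : Int) :
    PySem.List.clampIdx n (clampB (n : Int) i) = PySem.List.clampIdx n i := by
  unfold clampB PySem.List.clampIdx
  split_ifs <;> omega

theorem slice_clampB_left {α : Type} (xs : List α) (a : Int) (b? : Option Int) :
    PySem.List.slice xs (some (clampB (xs.length : Int) a)) b?
      = PySem.List.slice xs (some a) b? := by
  simp only [PySem.List.slice, clampIdx_clampB]

theorem slice_clampB_right {α : Type} (xs : List α) (a? : Option Int) (b : Int) :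
    PySem.List.slice xs a? (some (clampB (xs.length : Int) b))
      = PySem.List.slice xs a? (some b) := by
  simp only [PySem.List.slice, clampIdx_clampB]

-- closed form of A's fold: the list it builds and the final `end`
def mkA (values : List String) (e0 : Int) : List (Int × Int) → List (Option Int × List String)
  | [] => []
  | (s, i) :: t => (some i, PySem.List.slice values (some s) (some e0)) :: mkA values s t

def lastEnd (e0 : Int) : List (Int × Int) → Int
  | [] => e0
  | (s, _) :: t => lastEnd s t

theorem foldA_eq (values : List String) (secs : List (Int × Int))
    (acc : List (Option Int × List String)) (e0 : Int) :
    secs.foldl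
      (fun (st : List (Option Int × List String) × Int) p =>
        (st.1 ++ [(some p.2, PySem.List.slice values (some p.1) (some st.2))], p.1))
      (acc, e0)
    = (acc ++ mkA values e0 secs, lastEnd e0 secs) := by
  induction secs generalizing acc e0 with
  | nil => simp [mkA, lastEnd]
  | cons h t ih => simp [List.foldl, mkA, lastEnd, ih]

-- A's reversed body, written with a lookahead end parameter
def goE (values : List String) (e0 : Int) : List (Int × Int) → List (Option Int × List String)
  | [] => []
  | (s, i) :: rest =>
    let e : Int := match rest with
      | [] => e0
      | (s2, _) :: _ => s2
    (some i, PySem.List.slice values (some s) (some e)) :: goE values e0 rest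

theorem goE_append (values : List String) (s i e0 : Int) (xs : List (Int × Int)) :
    goE values e0 (xs ++ [(s, i)])
      = goE values s xs ++ [(some i, PySem.List.slice values (some s) (some e0))] := by
  induction xs with
  | nil => rfl
  | cons h t ih =>
    obtain ⟨a, b⟩ := h
    cases t with
    | nil => rfl
    | cons h2 t2 =>
      obtain ⟨c, d⟩ := h2
      simp only [List.cons_append, goE] at ih ⊢
      rw [ih]

theorem mkA_reverse (values : List String) (secs : List (Int × Int)) (e0 : Int) :
    (mkA values e0 secs).reverse = goE values e0 secs.reverse := by
  induction secs generalizing e0 with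
  | nil => rfl
  | cons h t ih =>
    obtain ⟨s, i⟩ := h
    simp [mkA, goE_append, ih]

theorem lastEnd_head (secs : List (Int × Int)) (e0 : Int) :
    lastEnd e0 secs = (match secs.reverse with
      | [] => e0
      | (s, _) :: _ => s) := by
  induction secs generalizing e0 with
  | nil => rfl
  | cons h t ih =>
    obtain ⟨s, i⟩ := h
    rw [lastEnd, ih]
    cases ht : t.reverse with
    | nil =>
      have : t = [] := by simpa using congrArg List.reverse ht
      simp [this]
    | cons h2 t2 => simp [ht]

-- B's zip-with-shift body computes goE
theorem zip_shift_eq_goE (values : List String) (rs : List (Int × Int)) :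
    ((rs.map (fun p => p.2)).zip
        ((rs.map (fun p => clampB (values.length : Int) p.1)).zip
          ((rs.map (fun p => clampB (values.length : Int) p.1)).tail ++ [(values.length : Int)]))).map
      (fun q => (some q.1, PySem.List.slice values (some q.2.1) (some q.2.2)))
      = goE values (values.length : Int) rs := by
  induction rs with
  | nil => rfl
  | cons h t ih =>
    obtain ⟨s, i⟩ := h
    cases t with
    | nil =>
      simp only [List.map, List.tail, List.nil_append, List.zip, List.zipWith, goE]
      rw [slice_clampB_left]
    | cons h2 t2 =>
      obtain ⟨s2, i2⟩ := h2
      simp only [List.map, List.tail, List.cons_append, List.zip, List.zipWith, goE] at ih ⊢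
      rw [slice_clampB_left, slice_clampB_right]
      exact congrArg _ ih

-- ===== VERDICT (by name: the statement is the Claim_ definition above) =====
theorem divide_sections_spec : Claim_equal_divide_sections := by
  intro values sections _
  unfold Spec_divide_sections divide_sections divide_sections_alt
  rw [foldA_eq]
  simp only [List.reverse_append, List.reverse_cons, List.reverse_nil, List.nil_append,
    List.cons_append]
  rw [mkA_reverse, lastEnd_head, ← zip_shift_eq_goE, ← List.map_reverse, ← List.map_reverse]
  cases hr : sections.reverse with
  | nil => simp
  | cons p rest =>
    obtain ⟨s, i⟩ := p
    simp only [List.map]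
    rw [slice_clampB_right]
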